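-- pv_equiv track=rewrite | github.com/20tab/django-political-map | src/politicalplaces/models.py | _get_main_type
-- ===== SOURCE A (Python) =====
-- POLITICAL_TYPES = [
--     'continent',
--     'country',
--     'administrative_area_level_1',
--     'administrative_area_level_2',
--     'administrative_area_level_3',
--     'administrative_area_level_4',
--     'administrative_area_level_5',
--     'locality',
--     'ward',
--     'sublocality',
--     'neighborhood',
-- ]
--
-- def _get_main_type(types):
--     for t in POLITICAL_TYPES:
--         if t in types:
--             return t
--     try:
--         return types[0]
--     except IndexError:
--         return ""
-- ===== SOURCE B (Python) =====
-- POLITICAL_TYPES = [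
--     'continent',
--     'country',
--     'administrative_area_level_1',
--     'administrative_area_level_2',
--     'administrative_area_level_3',
--     'administrative_area_level_4',
--     'administrative_area_level_5',
--     'locality',
--     'ward',
--     'sublocality',
--     'neighborhood',
-- ]
--
-- _RANK = {t: i for i, t in enumerate(POLITICAL_TYPES)}
--
-- def _get_main_type(types):
--     n = len(POLITICAL_TYPES)
--     best = n
--     for t in types:
--         r = _RANK.get(t, n)
--         if r < best:
--             best = r
--     if best < n:
--         return POLITICAL_TYPES[best]
--     try:
--         return types[0]
--     except IndexError:
--         return ""
-- ===== Notes on version B (the rewrite author's own statement) =====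
-- stated objective: alternative
-- what changed: A scans the priority list and tests membership of each priority type in the input (len(PT)*len(types) comparisons); B builds a rank dict once and makes a single pass over the input tracking the minimum rank, then returns POLITICAL_TYPES[best].
import Mathlib
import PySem

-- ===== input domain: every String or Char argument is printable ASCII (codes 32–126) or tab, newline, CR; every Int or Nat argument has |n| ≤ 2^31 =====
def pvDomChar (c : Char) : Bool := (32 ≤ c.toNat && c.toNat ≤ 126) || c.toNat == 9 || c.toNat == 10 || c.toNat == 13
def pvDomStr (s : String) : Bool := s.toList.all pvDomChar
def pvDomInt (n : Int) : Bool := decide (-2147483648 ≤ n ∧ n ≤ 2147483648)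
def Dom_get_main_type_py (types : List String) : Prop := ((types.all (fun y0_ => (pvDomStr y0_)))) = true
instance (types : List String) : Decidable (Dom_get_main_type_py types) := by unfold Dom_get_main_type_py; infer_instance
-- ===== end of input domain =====

-- B replaces A's scan of the priority list with membership tests by a single pass over the
-- input tracking the minimum rank from a precomputed rank dict (objective: alternative).

def politicalTypes : List String :=
  ["continent", "country", "administrative_area_level_1", "administrative_area_level_2",
   "administrative_area_level_3", "administrative_area_level_4", "administrative_area_level_5",
   "locality", "ward", "sublocality", "neighborhood"]

-- ===== PORT A =====
-- the 'for t in POLITICAL_TYPES' loop with early return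
def aLoop (types : List String) : List String → String
  | [] =>
    -- try: return types[0] except IndexError: return ""
    match PySem.List.pyGet? types 0 with
    | some s => s
    | none => ""
  | t :: rest => if t ∈ types then t else aLoop types rest

def get_main_type_py (types : List String) : String := aLoop types politicalTypes

-- ===== PORT B =====
-- _RANK = {t: i for i, t in enumerate(POLITICAL_TYPES)}
def bRank : PySem.Dict String Int :=
  (PySem.List.enumerate politicalTypes).foldl (fun d p => d.insert p.2 p.1) PySem.Dict.empty

def get_main_type_py_alt (types : List String) : String :=
  let n : Int := (politicalTypes.length : Int)
  let best := types.foldl (fun b t => let r := bRank.getD t n; if r < b then r else b) n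
  if best < n then (PySem.List.pyGet? politicalTypes best).getD ""
  else
    -- try: return types[0] except IndexError: return ""
    match PySem.List.pyGet? types 0 with
    | some s => s
    | none => ""

-- ===== PRECONDITION & SPEC =====
def Spec_get_main_type_py (types : List String) (out : String) : Prop := out = get_main_type_py_alt types
instance (types : List String) (out : String) : Decidable (Spec_get_main_type_py types out) := by unfold Spec_get_main_type_py; infer_instance

-- ===== CLAIM (what is proved, stated in full; the proofs are below) =====
def Claim_equal_get_main_type_py : Prop := ∀ (types : List String), Dom_get_main_type_py types → Spec_get_main_type_py types (get_main_type_py types)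

-- ===== LEMMAS AND PROOFS =====

-- rank lookup: either 11 (key absent), or the index of t in politicalTypes
set_option maxHeartbeats 1000000 in
lemma g_cases (t : String) :
    bRank.getD t 11 = 11 ∨
      (PySem.List.pyGet? politicalTypes (bRank.getD t 11) = some t ∧
        0 ≤ bRank.getD t 11 ∧ bRank.getD t 11 < 11) := by
  have h : bRank.getD t 11 = (if t = "neighborhood" then 10 else if t = "sublocality" then 9 else if t = "ward" then 8 else if t = "locality" then 7 else if t = "administrative_area_level_5" then 6 else if t = "administrative_area_level_4" then 5 else if t = "administrative_area_level_3" then 4 else if t = "administrative_area_level_2" then 3 else if t = "administrative_area_level_1" then 2 else if t = "country" then 1 else if t = "continent" then 0 else 11) := by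
    simp [bRank, politicalTypes, PySem.List.enumerate_cons, PySem.List.enumerate_nil, List.foldl,
      PySem.Dict.getD_insert, PySem.Dict.getD_empty]
  rw [h]
  split_ifs <;>
    first
      | (right; subst_vars; refine ⟨by decide, by decide, by decide⟩)
      | (left; rfl)

lemma g_mem_lt (t : String) (h : t ∈ politicalTypes) : bRank.getD t 11 < 11 := by
  fin_cases h <;> decide

lemma aLoop_eq_find (types pl : List String) :
    aLoop types pl =
      match pl.find? (fun t => decide (t ∈ types)) with
      | some s => s
      | none => match PySem.List.pyGet? types 0 with
                | some s => s
                | none => "" := by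
  induction pl with
  | nil => rfl
  | cons t rest ih =>
    by_cases h : t ∈ types <;> simp [aLoop, List.find?, h, ih]

-- the fold in B computes a running minimum of ranks
lemma fold_le_init (ts : List String) (b : Int) :
    ts.foldl (fun b t => let r := bRank.getD t 11; if r < b then r else b) b ≤ b := by
  induction ts generalizing b with
  | nil => simp
  | cons t rest ih =>
    simp only [List.foldl]
    split
    · exact le_trans (ih _) (by omega)
    · exact ih b

lemma fold_le_mem (ts : List String) (b : Int) (t : String) (ht : t ∈ ts) :
    ts.foldl (fun b t => let r := bRank.getD t 11; if r < b then r else b) b ≤ bRank.getD t 11 := by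
  induction ts generalizing b with
  | nil => cases ht
  | cons u rest ih =>
    simp only [List.foldl]
    rcases List.mem_cons.1 ht with rfl | hmem
    · split
      · exact le_trans (fold_le_init _ _) (le_refl _)
      · exact le_trans (fold_le_init _ _) (by omega)
    · split <;> exact ih _ hmem

lemma fold_attain (ts : List String) (b : Int) :
    ts.foldl (fun b t => let r := bRank.getD t 11; if r < b then r else b) b = b ∨
      ∃ t ∈ ts, ts.foldl (fun b t => let r := bRank.getD t 11; if r < b then r else b) b = bRank.getD t 11 := by
  induction ts generalizing b with
  | nil => exact Or.inl rfl
  | cons u rest ih =>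
    simp only [List.foldl]
    split
    · rcases ih (bRank.getD u 11) with h | ⟨t, ht, h⟩
      · exact Or.inr ⟨u, List.mem_cons_self, h⟩
      · exact Or.inr ⟨t, List.mem_cons_of_mem _ ht, h⟩
    · rcases ih b with h | ⟨t, ht, h⟩
      · exact Or.inl h
      · exact Or.inr ⟨t, List.mem_cons_of_mem _ ht, h⟩

lemma pt_nodup : politicalTypes.Nodup := by decide

-- ===== VERDICT (by name: the statement is the Claim_ definition above) =====
theorem get_main_type_py_spec : Claim_equal_get_main_type_py := by
  intro types _
  unfold Spec_get_main_type_py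
  show get_main_type_py types = get_main_type_py_alt types
  unfold get_main_type_py get_main_type_py_alt
  rw [aLoop_eq_find]
  have hn : (politicalTypes.length : Int) = 11 := by decide
  simp only [hn]
  set M := types.foldl (fun b t => let r := bRank.getD t 11; if r < b then r else b) 11 with hMdef
  by_cases hM : M < 11
  · -- some input element has a rank; B returns politicalTypes[M]
    have hMne : M ≠ 11 := by omega
    rcases fold_attain types 11 with h | ⟨t0, ht0, hEq⟩
    · exact absurd h hMne
    · have hg0 : PySem.List.pyGet? politicalTypes (bRank.getD t0 11) = some t0 ∧
          0 ≤ bRank.getD t0 11 ∧ bRank.getD t0 11 < 11 := by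
        rcases g_cases t0 with h11 | hok
        · rw [← hEq] at h11; exact absurd h11 hMne
        · exact hok
      have hMg : M = bRank.getD t0 11 := hMdef.trans hEq
      have hget : PySem.List.pyGet? politicalTypes M = some t0 := by rw [hMg]; exact hg0.1
      have hM0 : 0 ≤ M := by rw [hMg]; exact hg0.2.1
      -- find? is some
      have hfind : ∃ s, politicalTypes.find? (fun t => decide (t ∈ types)) = some s := by
        have : (politicalTypes.find? (fun t => decide (t ∈ types))).isSome := by
          rw [List.find?_isSome]
          exact ⟨t0, PySem.List.mem_of_pyGet?_eq_some _ hget, by simpa using ht0⟩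
        exact Option.isSome_iff_exists.1 this
      rcases hfind with ⟨s, hs⟩
      rcases List.find?_eq_some_iff_getElem.1 hs with ⟨hps, i, hilen, hpti, hmin⟩
      have hstypes : s ∈ types := by simpa using hps
      have hsPT : s ∈ politicalTypes := hpti ▸ (politicalTypes.getElem_mem hilen)
      -- rank of s
      have hgs : PySem.List.pyGet? politicalTypes (bRank.getD s 11) = some s ∧
          0 ≤ bRank.getD s 11 ∧ bRank.getD s 11 < 11 := by
        rcases g_cases s with h11 | hok
        · have := g_mem_lt s hsPT; omega
        · exact hok
      have hMles : M ≤ bRank.getD s 11 := fold_le_mem types 11 s hstypes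
      -- politicalTypes[(bRank.getD s 11).toNat] = s, so (bRank.getD s 11).toNat = i by nodup
      have hlen : politicalTypes.length = 11 := by decide
      have hgs_get : politicalTypes[(bRank.getD s 11).toNat]'(by omega) = s := by
        have := PySem.List.pyGet?_eq_some_getElem politicalTypes hgs.2.1 (by omega)
        rw [this] at hgs
        exact Option.some.inj hgs.1
      have hMget : politicalTypes[M.toNat]'(by omega) = t0 := by
        have := PySem.List.pyGet?_eq_some_getElem politicalTypes hM0 (by omega)
        rw [this] at hget
        exact Option.some.inj hget
      have hidx : (bRank.getD s 11).toNat = i := by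
        have : politicalTypes[(bRank.getD s 11).toNat]'(by omega) =
            politicalTypes[i]'hilen := by rw [hgs_get, hpti]
        exact (pt_nodup.getElem_inj_iff).1 this
      have hMi : M.toNat = i := by
        rcases Nat.lt_or_ge M.toNat i with hlt | hge
        · exfalso
          have := hmin M.toNat hlt
          simp only [Bool.not_eq_true'] at this
          rw [show politicalTypes[M.toNat]'(by omega) = t0 from hMget] at this
          simp at this
          exact this ht0
        · omega
      -- both sides equal s
      have ht0s : t0 = s := by rw [← hpti, ← hMget]; simp only [hMi]
      rw [hs]
      simp [if_pos hM, hget, ht0s]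
  · -- no input element is a political type: both fall back to types[0] / ""
    have hnone : politicalTypes.find? (fun t => decide (t ∈ types)) = none := by
      rw [List.find?_eq_none]
      intro t htPT
      simp only [decide_eq_true_eq]
      intro htypes
      have h1 := g_mem_lt t htPT
      have h2 := fold_le_mem types 11 t htypes
      omega
    rw [hnone]
    simp [if_neg hM]
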